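-- pv_equiv track=rewrite | github.com/pakxe/coding-test | 프로그래머스/2/131127. 할인 행사/할인 행사.py | solution
-- ===== SOURCE A (Python) =====
-- def solution(want, number, discount):
--     N = 10
--     ans = ''
--     for i in range(len(number)):
--         count = number[i]
--         ans += hex(count)[2:]
--
--     d = {}
--     for i in range(len(want)):
--         key = want[i]
--         d[key] = 0
--
--     res = 0
--     for i in range(len(discount) - N + 1):
--         if i == 0:
--             for j in range(i, i + N):
--                 item = discount[j]
--
--                 if item in d:
--                     d[item] += 1
--
--             temp = []
--             for key in d:
--                 count = d[key]
--                 temp.append(hex(count)[2:])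
--
--             if ''.join(temp) == ans:
--                 res += 1
--
--         else:
--             deleted_item = discount[i - 1]
--             new_item = discount[i + N - 1]
--
--             if deleted_item in d:
--                 d[deleted_item] -= 1
--
--             if new_item in d:
--                 d[new_item] += 1
--
--             temp = []
--             for key in d:
--                 count = d[key]
--                 temp.append(hex(count)[2:])
--
--             if ''.join(temp) == ans:
--                 res += 1
--
--     return res
-- ===== SOURCE B (Python) =====
-- def solution(want, number, discount):
--     # Simpler: no mutable dict or i==0 special case; recount each window slice directly.
--     N = 10
--     ans = ''.join(hex(n)[2:] for n in number)
--     keys = list(dict.fromkeys(want))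
--     res = 0
--     for i in range(len(discount) - N + 1):
--         window = discount[i:i + N]
--         sig = ''.join(hex(window.count(k))[2:] for k in keys)
--         if sig == ans:
--             res += 1
--     return res
-- ===== Notes on version B (the rewrite author's own statement) =====
-- stated objective: simpler
-- what changed: Replaced the mutable count-dict with its i==0 bootstrap branch and incremental +1/-1 sliding updates by a direct per-window recount: dedup the wanted keys once, slice each 10-day window and count each key in it, comparing the same hex signature.
import Mathlib
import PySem

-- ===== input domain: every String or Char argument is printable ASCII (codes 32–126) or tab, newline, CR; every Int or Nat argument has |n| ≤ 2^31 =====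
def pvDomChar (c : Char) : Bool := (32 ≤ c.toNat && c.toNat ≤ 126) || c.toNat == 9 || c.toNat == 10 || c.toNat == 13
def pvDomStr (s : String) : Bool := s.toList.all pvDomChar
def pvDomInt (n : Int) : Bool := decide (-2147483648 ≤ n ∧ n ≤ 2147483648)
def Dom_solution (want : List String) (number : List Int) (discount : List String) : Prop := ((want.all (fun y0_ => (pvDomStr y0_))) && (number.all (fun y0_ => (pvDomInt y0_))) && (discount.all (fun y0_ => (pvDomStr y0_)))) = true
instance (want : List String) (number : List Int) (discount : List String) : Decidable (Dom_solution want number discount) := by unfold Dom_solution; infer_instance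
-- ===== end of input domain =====

-- B replaces A's mutable count-dict with its i==0 bootstrap and incremental ±1 updates by a
-- direct per-window recount over the deduplicated keys (objective: simpler; same hex signature).

-- ===== PORT A =====
-- hex(n)[2:] ported by hand (PySem has no hex): exact for every int — hex(n) is '0x'+digits
-- for n ≥ 0 and '-0x'+digits for n < 0, so [2:] is the digits resp. 'x'+digits.
def hexDigit (n : Nat) : Char := if n < 10 then Char.ofNat (48 + n) else Char.ofNat (87 + n)

def hexChars (n : Nat) : List Char :=
  if h : n < 16 then [hexDigit n]
  else hexChars (n / 16) ++ [hexDigit (n % 16)]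
termination_by n
decreasing_by exact Nat.div_lt_self (by omega) (by omega)

def hexTail (n : Int) : List Char :=
  if n < 0 then 'x' :: hexChars n.natAbs else hexChars n.toNat

-- temp = [hex(d[key])[2:] for key in d]; ''.join(temp)
def sigOf (d : PySem.Dict String Int) : List Char :=
  PySem.Chars.join []
    (d.keys.foldl (fun t k => t ++ [hexTail (d.getD k 0)]) ([] : List (List Char)))

-- "if item in d: d[item] += 1" / "-= 1", one line each
def incrIf (d : PySem.Dict String Int) (item : String) : PySem.Dict String Int :=
  if d.contains item then d.insert item (d.getD item 0 + 1) else d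

def decrIf (d : PySem.Dict String Int) (item : String) : PySem.Dict String Int :=
  if d.contains item then d.insert item (d.getD item 0 - 1) else d

-- the else-branch updates: deleted_item = discount[i-1], new_item = discount[i+N-1]
def slideUpd (discount : List String) (d : PySem.Dict String Int) (i : Int) : PySem.Dict String Int :=
  incrIf (decrIf d (PySem.List.pyGetD discount (i - 1) ""))
    (PySem.List.pyGetD discount (i + 10 - 1) "")

-- the body of A's main loop (one value of i)
def stepA (discount : List String) (ans : List Char)
    (st : PySem.Dict String Int × Int) (i : Int) : PySem.Dict String Int × Int :=
  if i == 0 then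
    let d := (PySem.List.pyRange i (i + 10)).foldl
      (fun d j => incrIf d (PySem.List.pyGetD discount j "")) st.1
    (d, if sigOf d == ans then st.2 + 1 else st.2)
  else
    let d2 := slideUpd discount st.1 i
    (d2, if sigOf d2 == ans then st.2 + 1 else st.2)

def solution (want : List String) (number : List Int) (discount : List String) : Int :=
  let ans : List Char := (PySem.List.pyRange 0 (PySem.List.len number)).foldl
    (fun a i => a ++ hexTail (PySem.List.pyGetD number i 0)) []
  let d : PySem.Dict String Int := (PySem.List.pyRange 0 (PySem.List.len want)).foldl
    (fun d i => d.insert (PySem.List.pyGetD want i "") 0) PySem.Dict.empty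
  let st := (PySem.List.pyRange 0 (PySem.List.len discount - 10 + 1)).foldl
    (stepA discount ans) (d, 0)
  st.2

-- ===== PORT B =====
-- the body of B's loop (one value of i): recount each key in the sliced window
def stepB (want : List String) (discount : List String) (ans : List Char)
    (res : Int) (i : Int) : Int :=
  let window := PySem.List.slice discount (some i) (some (i + 10))
  let sig := PySem.Chars.join []
    ((PySem.List.dedup want).map (fun k => hexTail ((window.count k : Int))))
  if sig == ans then res + 1 else res

def solution_alt (want : List String) (number : List Int) (discount : List String) : Int :=
  let ans : List Char := PySem.Chars.join [] (number.map (fun n => hexTail n))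
  (PySem.List.pyRange 0 (PySem.List.len discount - 10 + 1)).foldl
    (stepB want discount ans) 0

-- ===== PRECONDITION & SPEC =====
def Spec_solution (want : List String) (number : List Int) (discount : List String) (out : Int) : Prop := out = solution_alt want number discount
instance (want : List String) (number : List Int) (discount : List String) (out : Int) : Decidable (Spec_solution want number discount out) := by unfold Spec_solution; infer_instance

-- ===== CLAIM (what is proved, stated in full; the proofs are below) =====
def Claim_equal_solution : Prop := ∀ (want : List String) (number : List Int) (discount : List String), Dom_solution want number discount → Spec_solution want number discount (solution want number discount)

-- ===== LEMMAS AND PROOFS =====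

-- the loop invariant: d's keys are the deduplicated want list and d counts the current window
def WInv (want : List String) (d : PySem.Dict String Int) (w : List String) : Prop :=
  d.keys = PySem.List.dedup want ∧
  ∀ k ∈ PySem.List.dedup want, d.getD k 0 = (w.count k : Int)

theorem join_nil_eq_flatten (ts : List (List Char)) :
    PySem.Chars.join [] ts = ts.flatten := by
  simp [PySem.Chars.join, List.intercalate]
  induction ts with
  | nil => simp
  | cons a t ih => cases t <;> simp_all [List.intersperse]

theorem fold_range_take {β : Type} (xs : List String) (g : β → String → β) :
    ∀ (n : Nat) (init : β), n ≤ xs.length →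
      (PySem.List.pyRange 0 (n : Int)).foldl
        (fun a i => g a (PySem.List.pyGetD xs i "")) init
      = (xs.take n).foldl g init := by
  intro n
  induction n with
  | zero => intro init _; simp [PySem.List.pyRange]
  | succ m ih =>
    intro init h
    have hm : m < xs.length := by omega
    rw [show ((m + 1 : Nat) : Int) = (m : Int) + 1 by push_cast; ring,
        PySem.List.pyRange_one_succ_right (by positivity), List.foldl_append,
        List.take_succ]
    simp only [List.foldl_append]
    rw [ih init (by omega)]
    simp [List.getElem?_eq_getElem hm]

theorem sigOf_inv {want : List String} {d : PySem.Dict String Int} {w : List String}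
    (h : WInv want d w) :
    sigOf d = PySem.Chars.join []
      ((PySem.List.dedup want).map (fun k => hexTail ((w.count k : Int)))) := by
  unfold sigOf
  rw [PySem.List.foldl_append_singleton_eq_map, List.nil_append, h.1]
  congr 1
  exact List.map_congr_left (fun k hk => by rw [h.2 k hk])

theorem incrLoop (xs : List String) : ∀ (d : PySem.Dict String Int),
    (xs.foldl incrIf d).keys = d.keys ∧
    ∀ k ∈ d.keys, (xs.foldl incrIf d).getD k 0 = d.getD k 0 + (xs.count k : Int) := by
  induction xs with
  | nil => intro d; simp
  | cons a t ih =>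
    intro d
    simp only [List.foldl_cons, incrIf]
    by_cases hc : d.contains a = true
    · rw [if_pos hc]
      obtain ⟨hk, hv⟩ := ih (d.insert a (d.getD a 0 + 1))
      have hkeys : (d.insert a (d.getD a 0 + 1)).keys = d.keys :=
        PySem.Dict.keys_insert_of_contains d _ hc
      refine ⟨by rw [hk, hkeys], fun k hkmem => ?_⟩
      rw [hv k (by rw [hkeys]; exact hkmem), PySem.Dict.getD_insert, List.count_cons]
      by_cases hka : k = a
      · subst hka; simp; push_cast; ring
      · simp [hka, Ne.symm hka]
    · rw [if_neg (by simpa using hc)]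
      obtain ⟨hk, hv⟩ := ih d
      refine ⟨hk, fun k hkmem => ?_⟩
      have hka : a ≠ k := by
        intro he; subst he
        exact absurd ((PySem.Dict.contains_iff_mem_keys d a).mpr hkmem) (by simpa using hc)
      rw [hv k hkmem, List.count_cons]
      simp [hka]

theorem initKeys (ws : List String) : ∀ (d : PySem.Dict String Int),
    (ws.foldl (fun d w => d.insert w 0) d).keys = PySem.Set.update d.keys ws := by
  induction ws with
  | nil => intro d; simp [PySem.Set.update]
  | cons a t ih =>
    intro d
    simp only [List.foldl_cons]
    rw [ih]
    have : (d.insert a 0).keys = PySem.Set.add d.keys a := by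
      by_cases hc : d.contains a = true
      · rw [PySem.Dict.keys_insert_of_contains d _ hc, PySem.Set.add]
        simp [PySem.Set.contains, (PySem.Dict.contains_iff_mem_keys d a).mp hc]
      · rw [PySem.Dict.keys_insert_of_not_contains d _ (by simpa using hc), PySem.Set.add]
        have : a ∉ d.keys := fun h => absurd ((PySem.Dict.contains_iff_mem_keys d a).mpr h) (by simpa using hc)
        simp [PySem.Set.contains, this]
    rw [this, PySem.Set.update, PySem.Set.update]
    rfl

theorem initZero (ws : List String) : ∀ (d : PySem.Dict String Int),
    (∀ k, d.getD k 0 = 0) → ∀ k, (ws.foldl (fun d w => d.insert w 0) d).getD k 0 = 0 := by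
  induction ws with
  | nil => intro d h; exact h
  | cons a t ih =>
    intro d h k
    simp only [List.foldl_cons]
    refine ih _ (fun k' => ?_) k
    rw [PySem.Dict.getD_insert]
    split <;> simp [h]

theorem count_slide (discount : List String) (j : Nat) (h : j + 11 ≤ discount.length)
    (k : String) :
    (((discount.drop (j+1)).take 10).count k : Int)
    = (((discount.drop j).take 10).count k : Int)
      - (if discount.getD j "" = k then 1 else 0)
      + (if discount.getD (j+10) "" = k then 1 else 0) := by
  have hj : j < discount.length := by omega
  have hj10 : j + 10 < discount.length := by omega
  have h1 : (discount.drop j).take 10 = discount[j] :: (discount.drop (j+1)).take 9 := by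
    rw [List.drop_eq_getElem_cons hj]; rfl
  have h9 : 9 < (discount.drop (j+1)).length := by simp; omega
  have h2 : (discount.drop (j+1)).take 10 = (discount.drop (j+1)).take 9 ++ [discount[j+10]] := by
    have ht := List.take_add_one (l := discount.drop (j+1)) (i := 9)
    rw [List.getElem?_eq_getElem h9] at ht
    rw [ht]
    congr 1
    have hix : j + 1 + 9 = j + 10 := by omega
    simp [List.getElem_drop, hix]
  rw [h1, h2, List.count_append, List.count_cons,
      List.getD_eq_getElem _ _ hj, List.getD_eq_getElem _ _ hj10]
  simp only [List.count_cons, List.count_nil, beq_iff_eq]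
  push_cast
  split <;> split <;> simp_all <;> ring

theorem stepA_zero (discount : List String) (ans : List Char)
    (d : PySem.Dict String Int) (r : Int) :
    stepA discount ans (d, r) 0 =
      ((PySem.List.pyRange 0 (0 + 10)).foldl
          (fun d j => incrIf d (PySem.List.pyGetD discount j "")) d,
       if sigOf ((PySem.List.pyRange 0 (0 + 10)).foldl
          (fun d j => incrIf d (PySem.List.pyGetD discount j "")) d) == ans
       then r + 1 else r) := rfl

theorem stepA_ne (discount : List String) (ans : List Char)
    (d : PySem.Dict String Int) (r : Int) (i : Int) (h : (i == 0) = false) :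
    stepA discount ans (d, r) i =
      (slideUpd discount d i,
       if sigOf (slideUpd discount d i) == ans then r + 1 else r) := by
  simp only [stepA, h, Bool.false_eq_true, if_false]

theorem step0 {want discount : List String} {ans : List Char}
    {d : PySem.Dict String Int} {r : Int}
    (hlen : 10 ≤ discount.length)
    (hk : d.keys = PySem.List.dedup want) (hz : ∀ k, d.getD k 0 = 0) :
    ∃ d', stepA discount ans (d, r) 0 = (d', stepB want discount ans r 0) ∧
      WInv want d' (discount.take 10) := by
  have hrange : (PySem.List.pyRange 0 (0 + 10)).foldl
      (fun d j => incrIf d (PySem.List.pyGetD discount j "")) d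
      = (discount.take 10).foldl incrIf d := by
    rw [show ((0 : Int) + 10) = ((10 : Nat) : Int) by norm_num]
    exact fold_range_take discount incrIf 10 d hlen
  obtain ⟨hkeys, hval⟩ := incrLoop (discount.take 10) d
  have hinv : WInv want ((discount.take 10).foldl incrIf d) (discount.take 10) := by
    refine ⟨by rw [hkeys, hk], fun k hkm => ?_⟩
    rw [hval k (by rw [hk]; exact hkm), hz k, zero_add]
  rw [stepA_zero, hrange]
  refine ⟨_, ?_, hinv⟩
  have hwin : PySem.List.slice discount (some 0) (some (0 + 10)) = discount.take 10 := by
    rw [show ((0 : Int) + 10) = ((10 : Nat) : Int) by norm_num,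
        PySem.List.slice_zero_start, PySem.List.slice_to_natCast]
  unfold stepB
  simp only [hwin]
  rw [sigOf_inv hinv]

theorem stepS {want discount : List String} {ans : List Char}
    {d : PySem.Dict String Int} {r : Int} (j : Nat)
    (hlen : j + 11 ≤ discount.length)
    (hinv : WInv want d ((discount.drop j).take 10)) :
    ∃ d', stepA discount ans (d, r) ((j : Int) + 1) = (d', stepB want discount ans r ((j : Int) + 1)) ∧
      WInv want d' ((discount.drop (j+1)).take 10) := by
  have hne : (((j : Int) + 1) == 0) = false := by simp; omega
  have hi1 : (j : Int) + 1 - 1 = ((j : Nat) : Int) := by ring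
  have hi2 : (j : Int) + 1 + 10 - 1 = ((j + 10 : Nat) : Int) := by push_cast; ring
  have hupd : slideUpd discount d ((j : Int) + 1)
      = incrIf (decrIf d (discount.getD j "")) (discount.getD (j+10) "") := by
    unfold slideUpd
    rw [hi1, hi2, PySem.List.pyGetD_natCast, PySem.List.pyGetD_natCast]
  set del := discount.getD j "" with hdel
  set nw := discount.getD (j+10) "" with hnw
  set d1 := decrIf d del with hd1
  set d2 := incrIf d1 nw with hd2
  have hk1 : d1.keys = PySem.List.dedup want := by
    rw [hd1]; unfold decrIf; split
    · rw [PySem.Dict.keys_insert_of_contains d _ (by assumption)]; exact hinv.1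
    · exact hinv.1
  have hv1 : ∀ k ∈ PySem.List.dedup want,
      d1.getD k 0 = ((discount.drop j).take 10).count k - (if del = k then 1 else 0) := by
    intro k hkm
    rw [hd1]; unfold decrIf
    by_cases hc : d.contains del = true
    · rw [if_pos hc, PySem.Dict.getD_insert]
      by_cases hkd : k = del
      · subst hkd; simp [hinv.2 _ hkm]
      · simp [hkd, Ne.symm hkd, hinv.2 k hkm]
    · have hdk : del ≠ k := by
        intro he; subst he
        exact absurd ((PySem.Dict.contains_iff_mem_keys d del).mpr (hinv.1 ▸ hkm)) (by simpa using hc)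
      rw [if_neg (by simpa using hc)]
      simp [hdk, hinv.2 k hkm]
  have hk2 : d2.keys = PySem.List.dedup want := by
    rw [hd2]; unfold incrIf; split
    · rw [PySem.Dict.keys_insert_of_contains d1 _ (by assumption)]; exact hk1
    · exact hk1
  have hv2 : ∀ k ∈ PySem.List.dedup want,
      d2.getD k 0 = (((discount.drop (j+1)).take 10).count k : Int) := by
    intro k hkm
    have hgoal : d2.getD k 0 = ((discount.drop j).take 10).count k
        - (if del = k then 1 else 0) + (if nw = k then 1 else 0) := by
      rw [hd2]; unfold incrIf
      by_cases hc : d1.contains nw = true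
      · rw [if_pos hc, PySem.Dict.getD_insert]
        by_cases hkn : k = nw
        · subst hkn; simp [hv1 _ hkm]
        · simp [hkn, Ne.symm hkn, hv1 k hkm]
      · have hnk : nw ≠ k := by
          intro he; subst he
          exact absurd ((PySem.Dict.contains_iff_mem_keys d1 nw).mpr (hk1 ▸ hkm)) (by simpa using hc)
        rw [if_neg (by simpa using hc)]
        simp [hnk, hv1 k hkm]
    rw [hgoal, count_slide discount j hlen k]
  have hinv' : WInv want d2 ((discount.drop (j+1)).take 10) := ⟨hk2, hv2⟩
  refine ⟨d2, ?_, hinv'⟩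
  rw [stepA_ne discount ans d r _ hne, hupd]
  unfold stepB
  have hwin : PySem.List.slice discount (some ((j : Int) + 1)) (some ((j : Int) + 1 + 10))
      = (discount.drop (j+1)).take 10 := by
    rw [show ((j : Int) + 1) = ((j + 1 : Nat) : Int) by push_cast; ring,
        show ((j + 1 : Nat) : Int) + 10 = ((j + 1 : Nat) : Int) + ((10 : Nat) : Int) by norm_num]
    exact PySem.List.slice_natCast_add discount (j+1) 10
  simp only [hwin]
  rw [sigOf_inv hinv']

theorem loopMain {want discount : List String} {ans : List Char}
    {d0 : PySem.Dict String Int}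
    (hk : d0.keys = PySem.List.dedup want) (hz : ∀ k, d0.getD k 0 = 0) :
    ∀ (n : Nat), 1 ≤ n → n + 9 ≤ discount.length →
    ∃ d, (PySem.List.pyRange 0 (n : Int)).foldl (stepA discount ans) (d0, 0)
        = (d, (PySem.List.pyRange 0 (n : Int)).foldl (stepB want discount ans) 0) ∧
      WInv want d ((discount.drop (n-1)).take 10) := by
  intro n
  induction n with
  | zero => omega
  | succ m ih =>
    intro _ hlen
    by_cases hm : m = 0
    · subst hm
      have hr : PySem.List.pyRange 0 ((1 : Nat) : Int) = [0] := by decide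
      rw [hr]
      simp only [List.foldl_cons, List.foldl_nil]
      obtain ⟨d', he, hinv⟩ := step0 (want := want) (ans := ans) (r := 0) (by omega) hk hz
      exact ⟨d', by rw [he], by simpa using hinv⟩
    · obtain ⟨d, he, hinv⟩ := ih (by omega) (by omega)
      rw [show ((m + 1 : Nat) : Int) = ((m : Nat) : Int) + 1 by push_cast; ring,
          PySem.List.pyRange_one_succ_right (by positivity),
          List.foldl_append, List.foldl_append, he]
      simp only [List.foldl_cons, List.foldl_nil]
      have hm1 : (m : Int) = ((m - 1 : Nat) : Int) + 1 := by omega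
      obtain ⟨d', he', hinv'⟩ := stepS (want := want) (discount := discount) (ans := ans)
        (r := (PySem.List.pyRange 0 ((m : Nat) : Int)).foldl (stepB want discount ans) 0)
        (m - 1) (by omega) (by rw [show m - 1 = m - 1 from rfl]; exact hinv)
      rw [← hm1] at he'
      rw [he']
      exact ⟨d', rfl, by rw [show m + 1 - 1 = (m - 1) + 1 by omega]; exact hinv'⟩

theorem pyRange_nonpos {b : Int} (h : b ≤ 0) : PySem.List.pyRange 0 b = [] := by
  simp only [PySem.List.pyRange]
  norm_num
  intro hb
  omega

theorem ans_eq (number : List Int) :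
    (PySem.List.pyRange 0 (PySem.List.len number)).foldl
      (fun a i => a ++ hexTail (PySem.List.pyGetD number i 0)) []
    = PySem.Chars.join [] (number.map (fun n => hexTail n)) := by
  rw [PySem.List.foldl_pyRange_pyGetD number 0
      (fun acc x => acc ++ hexTail x) [] (le_refl 0)]
  simp only [Int.toNat_zero, List.drop_zero, join_nil_eq_flatten]
  induction number with
  | nil => simp
  | cons a t ih =>
    simp only [List.foldl_cons, List.map_cons, List.flatten_cons]
    rw [show ([] ++ hexTail a) = hexTail a by simp]
    calc t.foldl (fun acc x => acc ++ hexTail x) (hexTail a)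
        = hexTail a ++ t.foldl (fun acc x => acc ++ hexTail x) [] := by
          rw [PySem.List.foldl_append_eq_flatMap, PySem.List.foldl_append_eq_flatMap]; simp
      _ = hexTail a ++ (t.map (fun n => hexTail n)).flatten := by rw [ih]

theorem d0_spec (want : List String) :
    ((PySem.List.pyRange 0 (PySem.List.len want)).foldl
      (fun d i => d.insert (PySem.List.pyGetD want i "") 0)
      (PySem.Dict.empty : PySem.Dict String Int)).keys = PySem.List.dedup want ∧
    ∀ k, ((PySem.List.pyRange 0 (PySem.List.len want)).foldl
      (fun d i => d.insert (PySem.List.pyGetD want i "") 0)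
      (PySem.Dict.empty : PySem.Dict String Int)).getD k 0 = 0 := by
  rw [show (List.foldl (fun d i => d.insert (PySem.List.pyGetD want i "") 0)
        (PySem.Dict.empty : PySem.Dict String Int) (PySem.List.pyRange 0 (PySem.List.len want)))
      = want.foldl (fun d w => d.insert w 0) PySem.Dict.empty from by
    simpa using PySem.List.foldl_pyRange_pyGetD want ""
      (fun (d : PySem.Dict String Int) w => d.insert w 0) PySem.Dict.empty (le_refl 0)]
  constructor
  · rw [initKeys]
    simp only [PySem.Dict.keys_empty]
    rw [PySem.List.dedup_eq_ofList, PySem.Set.ofList_eq_foldl]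
    rfl
  · exact initZero want PySem.Dict.empty (fun k => by simp)

-- ===== VERDICT (by name: the statement is the Claim_ definition above) =====
theorem solution_spec : Claim_equal_solution := by
  intro want number discount _
  unfold Spec_solution
  simp only [solution, solution_alt]
  rw [ans_eq number]
  set ans := PySem.Chars.join [] (number.map (fun n => hexTail n)) with hans
  obtain ⟨hk, hz⟩ := d0_spec want
  set d0 := (PySem.List.pyRange 0 (PySem.List.len want)).foldl
      (fun d i => d.insert (PySem.List.pyGetD want i "") 0)
      (PySem.Dict.empty : PySem.Dict String Int) with hd0
  by_cases hlen : discount.length ≤ 9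
  · have : PySem.List.len discount - 10 + 1 ≤ 0 := by
      simp only [PySem.List.len]; omega
    rw [pyRange_nonpos this]
    simp
  · have h10 : 10 ≤ discount.length := by omega
    have hn : (PySem.List.len discount - 10 + 1) = ((discount.length - 9 : Nat) : Int) := by
      simp only [PySem.List.len]; push_cast [Nat.cast_sub (by omega : 9 ≤ discount.length)]; ring
    rw [hn]
    obtain ⟨d, he, _⟩ := loopMain (ans := ans) (discount := discount) hk hz
      (discount.length - 9) (by omega) (by omega)
    rw [he]
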